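-- pv_equiv track=rewrite | github.com/aebif/natancno-citiranje | prototip.py | najdi_stran_citata
-- ===== SOURCE A (Python) =====
-- def najdi_stran_citata(citat, besedilo_po_straneh):
--     """Najde stran, na kateri se nahaja citat"""
--
--     for številka_strani, besedilo_strani in besedilo_po_straneh.items():
--         if citat in besedilo_strani:
--             return številka_strani
--
--     # Če ne najdemo natančnega ujemanja, poskusimo s prvimi besedami citata
--     prve_besede = " ".join(citat.split()[:10])  # Prvih 10 besed
--
--     for številka_strani, besedilo_strani in besedilo_po_straneh.items():
--         if prve_besede in besedilo_strani:
--             return številka_strani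
--
--     return None  # Če ne najdemo citata
-- ===== SOURCE B (Python) =====
-- def najdi_stran_citata(citat, besedilo_po_straneh):
--     """One pass: return exact match immediately, remember first first-10-words match as a set-once fallback."""
--     prve_besede = " ".join(citat.split()[:10])
--     rezerva = None
--     for stevilka_strani, besedilo_strani in besedilo_po_straneh.items():
--         if citat in besedilo_strani:
--             return stevilka_strani
--         if rezerva is None and prve_besede in besedilo_strani:
--             rezerva = stevilka_strani
--     return rezerva
-- ===== Notes on version B (the rewrite author's own statement) =====
-- stated objective: alternative
-- what changed: Replaces A's two separate scans over the pages with a single pass that returns an exact match immediately and keeps a set-once fallback for the first page matching the first 10 words.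
import Mathlib
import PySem

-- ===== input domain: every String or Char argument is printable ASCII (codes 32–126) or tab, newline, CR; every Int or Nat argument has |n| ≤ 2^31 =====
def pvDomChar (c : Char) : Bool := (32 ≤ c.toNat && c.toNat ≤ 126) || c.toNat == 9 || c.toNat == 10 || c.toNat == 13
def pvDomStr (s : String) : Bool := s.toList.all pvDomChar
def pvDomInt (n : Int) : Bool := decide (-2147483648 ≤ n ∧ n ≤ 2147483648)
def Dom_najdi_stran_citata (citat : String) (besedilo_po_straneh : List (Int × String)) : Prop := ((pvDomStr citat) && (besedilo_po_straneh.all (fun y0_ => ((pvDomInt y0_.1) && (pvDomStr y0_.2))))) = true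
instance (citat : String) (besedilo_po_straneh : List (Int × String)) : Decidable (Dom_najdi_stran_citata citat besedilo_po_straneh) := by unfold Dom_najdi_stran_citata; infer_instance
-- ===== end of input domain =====

-- B replaces A's two scans over the pages by a single pass with a set-once fallback
-- for the first-10-words match (alternative decomposition, same cost).

-- ===== PORT A =====
-- first loop: return the first page whose text contains the quote
def pvLoopExact (citat : String) : List (Int × String) → Option Int
  | [] => none
  | (k, t) :: rest =>
    if PySem.Str.isIn citat t then some k else pvLoopExact citat rest

-- second loop: return the first page whose text contains the first 10 words
def pvLoopPrve (prve : String) : List (Int × String) → Option Int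
  | [] => none
  | (k, t) :: rest =>
    if PySem.Str.isIn prve t then some k else pvLoopPrve prve rest

def najdi_stran_citata (citat : String) (besedilo_po_straneh : List (Int × String)) : Option Int :=
  match pvLoopExact citat besedilo_po_straneh with
  | some k => some k
  | none =>
    let prve_besede := PySem.Str.join " " (PySem.List.slice (PySem.Str.split₀ citat) none (some 10))
    pvLoopPrve prve_besede besedilo_po_straneh

-- ===== PORT B =====
-- single pass: exact match returns at once; fallback is recorded only when still None
def pvAltLoop (citat prve : String) : List (Int × String) → Option Int → Option Int
  | [], rezerva => rezerva
  | (k, t) :: rest, rezerva =>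
    if PySem.Str.isIn citat t then some k
    else pvAltLoop citat prve rest
      (if rezerva.isNone && PySem.Str.isIn prve t then some k else rezerva)

def najdi_stran_citata_alt (citat : String) (besedilo_po_straneh : List (Int × String)) : Option Int :=
  let prve_besede := PySem.Str.join " " (PySem.List.slice (PySem.Str.split₀ citat) none (some 10))
  pvAltLoop citat prve_besede besedilo_po_straneh none

-- ===== PRECONDITION & SPEC =====
def Spec_najdi_stran_citata (citat : String) (besedilo_po_straneh : List (Int × String)) (out : Option Int) : Prop := out = najdi_stran_citata_alt citat besedilo_po_straneh
instance (citat : String) (besedilo_po_straneh : List (Int × String)) (out : Option Int) : Decidable (Spec_najdi_stran_citata citat besedilo_po_straneh out) := by unfold Spec_najdi_stran_citata; infer_instance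

-- ===== CLAIM (what is proved, stated in full; the proofs are below) =====
def Claim_equal_najdi_stran_citata : Prop := ∀ (citat : String) (besedilo_po_straneh : List (Int × String)), Dom_najdi_stran_citata citat besedilo_po_straneh → Spec_najdi_stran_citata citat besedilo_po_straneh (najdi_stran_citata citat besedilo_po_straneh)

-- ===== LEMMAS AND PROOFS =====
-- the one-pass loop equals: first exact match, else the sticky fallback, else the first prve match
theorem pvAltLoop_eq (citat prve : String) (l : List (Int × String)) (rezerva : Option Int) :
    pvAltLoop citat prve l rezerva =
      match pvLoopExact citat l with
      | some k => some k
      | none =>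
        match rezerva with
        | some f => some f
        | none => pvLoopPrve prve l := by
  induction l generalizing rezerva with
  | nil => cases rezerva <;> simp [pvAltLoop, pvLoopExact, pvLoopPrve]
  | cons p rest ih =>
    obtain ⟨k, t⟩ := p
    by_cases h : PySem.Chars.isIn citat.toList t.toList = true
    · simp [pvAltLoop, pvLoopExact, h]
    · by_cases hp : PySem.Chars.isIn prve.toList t.toList = true <;>
        cases rezerva <;>
        simp [pvAltLoop, pvLoopExact, pvLoopPrve, h, hp, ih]

-- ===== VERDICT (by name: the statement is the Claim_ definition above) =====
theorem najdi_stran_citata_spec : Claim_equal_najdi_stran_citata := by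
  intro citat ps _
  show najdi_stran_citata citat ps = najdi_stran_citata_alt citat ps
  simp only [najdi_stran_citata, najdi_stran_citata_alt, pvAltLoop_eq]
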